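-- pv_equiv track=rewrite | github.com/Niloth-p/Search-Engine | Indexer.py | insertinpostingslist
-- ===== SOURCE A (Python) =====
-- def insertinpostingslist(tokensindoc, docID, postingslist):
--     """
--     Inserts all the given tokens of each doc into the postings list,
--     in a suitable format, for later retrieval
--     """
--     if any(postingslist):
--         for token, term in [(token, term) for token in tokensindoc for term in postingslist.keys()]:
--             if token == term:
--                 postingslist[term].append(docID)
--     else:
--         for token in tokensindoc:
--             postingslist[token] = [docID]
--     return postingslist
-- ===== SOURCE B (Python) =====
-- def insertinpostingslist(tokensindoc, docID, postingslist):
--     """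
--     Inserts all the given tokens of each doc into the postings list,
--     in a suitable format, for later retrieval (returns a fresh dict;
--     equal to A's return value, without A's in-place mutation)
--     """
--     if any(postingslist):
--         counts = {}
--         for t in tokensindoc:
--             counts[t] = counts.get(t, 0) + 1
--         return {term: lst + [docID] * counts.get(term, 0)
--                 for term, lst in postingslist.items()}
--     merged = dict(postingslist)
--     merged.update((t, [docID]) for t in tokensindoc)
--     return merged
-- ===== Notes on version B (the rewrite author's own statement) =====
-- stated objective: faster
-- what changed: B replaces A's nested token-by-key cross-product scan with a one-pass frequency table over the tokens and then rebuilds the postings dict by a single comprehension over its items (extending each list by docID times its token count); the else branch becomes a dict copy plus update instead of an item-by-item loop; return value is identical, B does not mutate its argument.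
import Mathlib
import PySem

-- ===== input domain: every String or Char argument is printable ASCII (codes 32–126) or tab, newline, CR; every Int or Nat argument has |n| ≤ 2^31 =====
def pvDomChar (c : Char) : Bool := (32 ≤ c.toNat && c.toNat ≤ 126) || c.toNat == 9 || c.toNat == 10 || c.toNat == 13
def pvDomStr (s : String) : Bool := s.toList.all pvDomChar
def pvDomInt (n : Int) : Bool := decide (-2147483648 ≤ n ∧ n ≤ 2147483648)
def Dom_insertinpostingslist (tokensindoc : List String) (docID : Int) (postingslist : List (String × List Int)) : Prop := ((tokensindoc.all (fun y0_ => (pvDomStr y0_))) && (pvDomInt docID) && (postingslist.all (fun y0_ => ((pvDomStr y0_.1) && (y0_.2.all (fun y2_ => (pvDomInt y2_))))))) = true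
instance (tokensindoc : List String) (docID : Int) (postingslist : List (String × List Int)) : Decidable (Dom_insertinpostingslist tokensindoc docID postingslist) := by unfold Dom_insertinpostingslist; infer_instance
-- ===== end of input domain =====

-- B builds a one-pass token frequency table and rebuilds the dict in one comprehension over its
-- items (faster); equal RETURN value is proved — A also mutates `postingslist` in place, B does not.

-- ===== PORT A =====
-- any(postingslist) iterates the dict's keys; a key is truthy iff it is a non-empty string.
-- postingslist[term].append(docID): term is always a key here, so Dict.modify with default [] is exact.
def insertinpostingslist (tokensindoc : List String) (docID : Int) (postingslist : List (String × List Int)) : List (String × List Int) :=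
  let d := PySem.Dict.mk postingslist
  (if d.keys.any (fun k => k != "") then
    (tokensindoc.flatMap (fun token => d.keys.map (fun term => (token, term)))).foldl
      (fun e p => if p.1 == p.2 then e.modify p.2 [] (fun v => v ++ [docID]) else e) d
  else
    tokensindoc.foldl (fun e token => e.insert token [docID]) d).items

-- ===== PORT B =====
-- counts[t] = counts.get(t, 0) + 1; then the dict comprehension
-- {term: lst + [docID]*counts.get(term, 0) for term, lst in postingslist.items()} is a fold of
-- inserts into a fresh dict; the else branch is dict(postingslist) followed by .update(...).
def insertinpostingslist_alt (tokensindoc : List String) (docID : Int) (postingslist : List (String × List Int)) : List (String × List Int) :=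
  if postingslist.any (fun q => q.1 != "") then
    let counts := tokensindoc.foldl
      (fun c t => c.insert t (c.getD t 0 + 1)) (PySem.Dict.empty : PySem.Dict String Int)
    (postingslist.foldl
      (fun e q => e.insert q.1 (q.2 ++ List.replicate (counts.getD q.1 0).toNat docID))
      (PySem.Dict.empty : PySem.Dict String (List Int))).items
  else
    ((PySem.Dict.mk postingslist).update (tokensindoc.map (fun t => (t, [docID])))).items

-- ===== PRECONDITION & SPEC =====
-- Pre_ excludes association lists with duplicate keys: they cannot arise from a Python dict
-- (the dict collapses them before either function runs), so the two encodings' behaviour there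
-- is a defensible-corner artefact of the List (String × List Int) representation.
def Pre_insertinpostingslist (tokensindoc : List String) (docID : Int) (postingslist : List (String × List Int)) : Prop :=
  (postingslist.map Prod.fst).Nodup
instance (tokensindoc : List String) (docID : Int) (postingslist : List (String × List Int)) : Decidable (Pre_insertinpostingslist tokensindoc docID postingslist) := by unfold Pre_insertinpostingslist; infer_instance
def pvWitness_insertinpostingslist : List String × Int × (List (String × List Int)) :=
  (["a", "b", "a"], 7, [("a", [1]), ("b", [])])
def Spec_insertinpostingslist (tokensindoc : List String) (docID : Int) (postingslist : List (String × List Int)) (out : List (String × List Int)) : Prop := out = insertinpostingslist_alt tokensindoc docID postingslist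
instance (tokensindoc : List String) (docID : Int) (postingslist : List (String × List Int)) (out : List (String × List Int)) : Decidable (Spec_insertinpostingslist tokensindoc docID postingslist out) := by unfold Spec_insertinpostingslist; infer_instance

-- ===== CLAIM (what is proved, stated in full; the proofs are below) =====
def Claim_equal_insertinpostingslist : Prop := ∀ (tokensindoc : List String) (docID : Int) (postingslist : List (String × List Int)), Dom_insertinpostingslist tokensindoc docID postingslist → Pre_insertinpostingslist tokensindoc docID postingslist → Spec_insertinpostingslist tokensindoc docID postingslist (insertinpostingslist tokensindoc docID postingslist)

-- ===== LEMMAS AND PROOFS =====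

-- modify (append) on a dict with distinct keys is a pointwise map over the items
theorem pv_modify_map (e : PySem.Dict String (List Int)) (t : String) (xs : List Int)
    (hnd : e.keys.Nodup) (ht : t ∈ e.keys) :
    e.modify t [] (fun v => v ++ xs)
      = PySem.Dict.mk (e.items.map (fun q => if q.1 = t then (q.1, q.2 ++ xs) else q)) := by
  have hc : e.contains t = true := (PySem.Dict.contains_iff_mem_keys e t).mpr ht
  simp only [PySem.Dict.modify, PySem.Dict.insert, hc, if_true]
  refine congrArg PySem.Dict.mk (List.map_congr_left ?_)
  intro q hq
  obtain ⟨k0, v0⟩ := q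
  by_cases h : k0 = t
  · have : e.getD k0 [] = v0 := PySem.Dict.getD_of_mem_items e hq hnd []
    simp [h, h ▸ this]
  · simp [h]

-- filtering a nodup list for one element
theorem pv_filter_nodup (t : String) :
    ∀ (ks : List String), ks.Nodup →
      ks.filter (fun k => t == k) = if t ∈ ks then [t] else [] := by
  intro ks hnd
  induction ks with
  | nil => simp
  | cons a ks ih =>
    have hnd' := hnd.of_cons
    by_cases h : t = a
    · subst h
      have : t ∉ ks := (List.nodup_cons.mp hnd).1
      simp [ih hnd', this]
    · simp [h, ih hnd']

-- A's nested token×key loop, characterised as a pointwise map by token counts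
theorem pv_Aside (docID : Int) (ks : List String) (hnd : ks.Nodup) :
    ∀ (toks : List String) (e : PySem.Dict String (List Int)), e.keys = ks →
      (toks.flatMap (fun token => ks.map (fun term => (token, term)))).foldl
        (fun e p => if p.1 == p.2 then e.modify p.2 [] (fun v => v ++ [docID]) else e) e
      = PySem.Dict.mk (e.items.map
          (fun q => (q.1, q.2 ++ List.replicate (toks.count q.1) docID))) := by
  intro toks
  induction toks with
  | nil =>
    intro e _; simp
  | cons t ts ih =>
    intro e hke
    have hnd' : e.keys.Nodup := hke ▸ hnd
    rw [List.flatMap_cons, List.foldl_append]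
    have hinner :
        (ks.map (fun term => (t, term))).foldl
          (fun e p => if p.1 == p.2 then e.modify p.2 [] (fun v => v ++ [docID]) else e) e
        = if t ∈ ks then e.modify t [] (fun v => v ++ [docID]) else e := by
      rw [PySem.List.foldl_if_eq_foldl_filter (α := String × String)
            (δ := PySem.Dict String (List Int)) (fun p => p.1 == p.2)
            (fun e p => e.modify p.2 [] (fun v => v ++ [docID]))]
      rw [List.filter_map]
      have : (fun p => p.1 == p.2) ∘ (fun term => (t, term)) = fun k => t == k := rfl
      rw [this, pv_filter_nodup t ks hnd]
      by_cases h : t ∈ ks <;> simp [h]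
    rw [hinner]
    by_cases h : t ∈ ks
    · have hke' : (e.modify t [] (fun v => v ++ [docID])).keys = ks := by
        rw [PySem.Dict.keys_modify, PySem.Dict.keys_insert_of_contains, hke]
        exact (PySem.Dict.contains_iff_mem_keys e t).mpr (hke ▸ h)
      simp only [h, if_true]
      rw [ih _ hke', pv_modify_map e t [docID] hnd' (hke ▸ h)]
      refine congrArg PySem.Dict.mk ?_
      rw [List.map_map]
      refine List.map_congr_left ?_
      intro q _
      by_cases hq : q.1 = t
      · simp [Function.comp, hq, List.replicate_succ, List.append_assoc]
      · simp [Function.comp, hq, Ne.symm hq]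
    · simp only [h, if_false]
      rw [ih e hke]
      refine congrArg PySem.Dict.mk (List.map_congr_left ?_)
      intro q hq
      have hqk : q.1 ∈ ks := hke ▸ (List.mem_map.mpr ⟨q, hq, rfl⟩)
      have : q.1 ≠ t := fun hEq => h (hEq ▸ hqk)
      simp [Ne.symm this]

-- ===== VERDICT (by name: the statement is the Claim_ definition above) =====
theorem insertinpostingslist_spec : Claim_equal_insertinpostingslist := by
  intro toks docID pl _ hpre
  unfold Spec_insertinpostingslist
  unfold insertinpostingslist insertinpostingslist_alt
  simp only []
  set d := PySem.Dict.mk pl with hd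
  have hkeys : d.keys = pl.map Prod.fst := rfl
  have hnd : d.keys.Nodup := hkeys ▸ hpre
  have hguard : d.keys.any (fun k => k != "") = pl.any (fun q => q.1 != "") := by
    rw [hkeys, List.any_map]; rfl
  by_cases hb : pl.any (fun q => q.1 != "") = true
  · rw [hguard, hb]
    simp only [if_true]
    -- A side: the nested loop is a pointwise map by token counts
    rw [pv_Aside docID d.keys hnd toks d rfl]
    -- B side: the count loop is Counter, the rebuild loop over fresh keys appends
    rw [PySem.Dict.foldl_insert_getD_add_one_eq_counter]
    rw [PySem.Dict.items_foldl_insert_fresh pl Prod.fst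
          (fun q => q.2 ++ List.replicate ((PySem.Dict.counter toks).getD q.1 0).toNat docID)
          PySem.Dict.empty (by intro a _; rfl) hpre]
    refine congrArg PySem.Dict.items (congrArg PySem.Dict.mk ?_)
    show pl.map _ = [] ++ pl.map _
    rw [List.nil_append]
    refine List.map_congr_left ?_
    intro q _
    rw [PySem.Dict.getD_counter]
    simp
  · rw [hguard, if_neg hb, if_neg hb]
    -- dict(postingslist).update(...) is the same insert loop as A's else branch
    show (toks.foldl (fun e token => e.insert token [docID]) d).items
        = (d.update (toks.map (fun t => (t, [docID])))).items
    have : d.update (toks.map (fun t => (t, [docID])))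
        = toks.foldl (fun e token => e.insert token [docID]) d := by
      show (toks.map (fun t => (t, [docID]))).foldl (fun e p => e.insert p.1 p.2) d = _
      rw [List.foldl_map]
    rw [this]
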